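-- pv_equiv track=rewrite | github.com/mariiio/rally-cut | analysis/scripts/diagnose_court_side_errors.py | _find_best_permutation
-- ===== SOURCE A (Python) =====
-- import itertools
--
-- def _find_best_permutation(
--     gt_rallies: dict[str, dict[str, int]],
--     pred_rallies: dict[str, dict[str, int]],
-- ) -> tuple[dict[int, int], int, int]:
--     player_ids = [1, 2, 3, 4]
--     best_perm: dict[int, int] = {}
--     best_correct = -1
--     best_total = 0
--     for perm in itertools.permutations(player_ids):
--         pred_to_gt = {pid: gpid for pid, gpid in zip(player_ids, perm)}
--         correct = 0
--         total = 0
--         for rid in gt_rallies: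
--             if rid not in pred_rallies:
--                 continue
--             gt = gt_rallies[rid]
--             pred = pred_rallies[rid]
--             for tid_str in gt:
--                 if tid_str not in pred:
--                     continue
--                 total += 1
--                 if pred_to_gt.get(pred[tid_str]) == gt[tid_str]:
--                     correct += 1
--         if correct > best_correct:
--             best_correct = correct
--             best_total = total
--             best_perm = pred_to_gt
--     return best_perm, best_correct, best_total
-- ===== SOURCE B (Python) =====
-- def _find_best_permutation(
--     gt_rallies: dict[str, dict[str, int]],
--     pred_rallies: dict[str, dict[str, int]],
-- ) -> tuple[dict[int, int], int, int]:
--     """Flatten the data once into a list of matched (pred_id, gt_id) pairs, tally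
--     them in a counter, then score each of the 24 permutations (generated by a
--     small recursive enumerator in the same lexicographic order) from the counter
--     with four lookups instead of rescanning all rallies 24 times."""
--     pairs = [
--         (pred_rallies[rid][t], g)
--         for rid, gt in gt_rallies.items()
--         if rid in pred_rallies
--         for t, g in gt.items()
--         if t in pred_rallies[rid]
--     ]
--     cnt: dict[tuple[int, int], int] = {}
--     for pg in pairs:
--         cnt[pg] = cnt.get(pg, 0) + 1
--
--     def perms(rem: list[int]) -> list[list[int]]:
--         if not rem:
--             return [[]]
--         return [[x] + rest for x in rem for rest in perms([y for y in rem if y != x])]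
--
--     best_perm: list[int] = []
--     best_correct = -1
--     for perm in perms([1, 2, 3, 4]):
--         score = sum(cnt.get((i + 1, perm[i]), 0) for i in range(4))
--         if score > best_correct:
--             best_perm, best_correct = perm, score
--     return {i + 1: best_perm[i] for i in range(4)}, best_correct, len(pairs)
-- ===== Notes on version B (the rewrite author's own statement) =====
-- stated objective: faster
-- what changed: Instead of rescanning all rallies for each of the 24 permutations, B flattens the data once into a list of matched (pred_id, gt_id) pairs, tallies them in a counter dict, and scores each permutation (generated by its own recursive enumerator in the same lexicographic order) with four counter lookups.
import Mathlib
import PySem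

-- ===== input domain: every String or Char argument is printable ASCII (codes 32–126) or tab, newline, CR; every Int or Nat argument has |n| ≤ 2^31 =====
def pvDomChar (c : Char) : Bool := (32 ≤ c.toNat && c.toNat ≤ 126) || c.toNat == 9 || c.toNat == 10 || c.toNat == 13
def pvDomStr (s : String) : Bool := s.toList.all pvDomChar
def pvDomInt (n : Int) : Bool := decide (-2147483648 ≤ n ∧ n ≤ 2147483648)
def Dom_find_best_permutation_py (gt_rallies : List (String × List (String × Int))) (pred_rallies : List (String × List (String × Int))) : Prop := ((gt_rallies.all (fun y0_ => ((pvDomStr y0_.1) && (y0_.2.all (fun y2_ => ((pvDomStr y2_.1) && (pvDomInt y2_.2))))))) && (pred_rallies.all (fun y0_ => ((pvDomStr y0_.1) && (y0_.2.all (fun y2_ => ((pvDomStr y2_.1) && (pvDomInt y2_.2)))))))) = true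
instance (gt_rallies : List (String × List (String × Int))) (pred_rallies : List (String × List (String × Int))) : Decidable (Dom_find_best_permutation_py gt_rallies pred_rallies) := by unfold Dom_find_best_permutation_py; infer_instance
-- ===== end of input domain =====

-- B replaces A's 24 full rescans of the rally data by one flattening pass into a
-- matched-pair list tallied in a counter; the 24 permutations (generated by B's own
-- recursive enumerator in the same order) are scored by four counter lookups each.


-- ===== PORT A =====
-- A: for every one of the 24 permutations, rescan all matched (rally, track) pairs
-- counting agreements, keeping the first permutation with a strictly larger count.
def pvA_istep (m : PySem.Dict Int Int) (pred : PySem.Dict String Int)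
    (ct : Int × Int) (tp : String × Int) : Int × Int :=
  match pred.get? tp.1 with
  | none => ct
  | some pv => ((if m.get? pv = some tp.2 then ct.1 + 1 else ct.1), ct.2 + 1)

def pvA_step (predD : PySem.Dict String (PySem.Dict String Int)) (m : PySem.Dict Int Int)
    (ct : Int × Int) (rp : String × PySem.Dict String Int) : Int × Int :=
  match predD.get? rp.1 with
  | none => ct
  | some pred => rp.2.items.foldl (pvA_istep m pred) ct

def find_best_permutation_py (gt_rallies : List (String × List (String × Int))) (pred_rallies : List (String × List (String × Int))) : (List (Int × Int)) × Int × Int :=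
  let gtD := PySem.Dict.ofList (gt_rallies.map (fun p => (p.1, PySem.Dict.ofList p.2)))
  let predD := PySem.Dict.ofList (pred_rallies.map (fun p => (p.1, PySem.Dict.ofList p.2)))
  let playerIds : List Int := [1, 2, 3, 4]
  (PySem.List.permutations playerIds 4).foldl
    (fun (best : (List (Int × Int)) × Int × Int) perm =>
      let m := PySem.Dict.ofList (playerIds.zip perm)
      let ct := gtD.items.foldl (pvA_step predD m) ((0 : Int), (0 : Int))
      if ct.1 > best.2.1 then (m.items, ct.1, ct.2) else best)
    ([], -1, 0)

-- ===== PORT B =====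
-- B: flatten once into the list of matched (pred_id, gt_id) pairs (the comprehension),
-- tally it in a counter dict, then score each permutation with four lookups.
def pvB_pairs (gtD predD : PySem.Dict String (PySem.Dict String Int)) : List (Int × Int) :=
  gtD.items.flatMap (fun rp =>
    match predD.get? rp.1 with
    | none => []
    | some pred => rp.2.items.filterMap (fun tp => (pred.get? tp.1).map (fun pv => (pv, tp.2))))

-- Python's `perms` recurses on the shrinking list; ported with the list length as
-- structural fuel (exact: each recursive call drops one element, so fuel never runs out).
def pvB_perms (fuel : Nat) (rem : List Int) : List (List Int) :=
  if rem = [] then [[]]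
  else match fuel with
    | 0 => []
    | n + 1 => rem.flatMap (fun x => (pvB_perms n (rem.filter (fun y => y != x))).map (x :: ·))

def find_best_permutation_py_alt (gt_rallies : List (String × List (String × Int))) (pred_rallies : List (String × List (String × Int))) : (List (Int × Int)) × Int × Int :=
  let gtD := PySem.Dict.ofList (gt_rallies.map (fun p => (p.1, PySem.Dict.ofList p.2)))
  let predD := PySem.Dict.ofList (pred_rallies.map (fun p => (p.1, PySem.Dict.ofList p.2)))
  let pairs := pvB_pairs gtD predD
  let cnt := pairs.foldl (fun (d : PySem.Dict (Int × Int) Int) pg => d.modify pg 0 (· + 1)) PySem.Dict.empty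
  -- perm[i] and best_perm[i] are exact as getD: perms only produces length-4 lists here
  let best := (pvB_perms 4 [1, 2, 3, 4]).foldl
    (fun (b : List Int × Int) perm =>
      let score := ((List.range 4).map (fun i => cnt.getD (((i : Nat) : Int) + 1, perm.getD i 0) 0)).sum
      if score > b.2 then (perm, score) else b)
    ([], -1)
  ((List.range 4).map (fun i => (((i : Nat) : Int) + 1, best.1.getD i 0)), best.2, (pairs.length : Int))

-- ===== PRECONDITION & SPEC =====
def Spec_find_best_permutation_py (gt_rallies : List (String × List (String × Int))) (pred_rallies : List (String × List (String × Int))) (out : (List (Int × Int)) × Int × Int) : Prop := out = find_best_permutation_py_alt gt_rallies pred_rallies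
instance (gt_rallies : List (String × List (String × Int))) (pred_rallies : List (String × List (String × Int))) (out : (List (Int × Int)) × Int × Int) : Decidable (Spec_find_best_permutation_py gt_rallies pred_rallies out) := by unfold Spec_find_best_permutation_py; infer_instance

-- ===== CLAIM (what is proved, stated in full; the proofs are below) =====
def Claim_equal_find_best_permutation_py : Prop := ∀ (gt_rallies : List (String × List (String × Int))) (pred_rallies : List (String × List (String × Int))), Dom_find_best_permutation_py gt_rallies pred_rallies → Spec_find_best_permutation_py gt_rallies pred_rallies (find_best_permutation_py gt_rallies pred_rallies)

-- ===== LEMMAS AND PROOFS =====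

-- A's inner fold counts matches and total over the matched pairs of one rally.
lemma pvA_inner (m : PySem.Dict Int Int) (pred : PySem.Dict String Int)
    (l : List (String × Int)) (ct : Int × Int) :
    l.foldl (pvA_istep m pred) ct
      = (ct.1 + (((l.filterMap (fun tp => (pred.get? tp.1).map (fun pv => (pv, tp.2)))).countP
            (fun pg => decide (m.get? pg.1 = some pg.2)) : Int)),
         ct.2 + ((l.filterMap (fun tp => (pred.get? tp.1).map (fun pv => (pv, tp.2)))).length : Int)) := by
  induction l generalizing ct with
  | nil => simp
  | cons tp l ih =>
    simp only [List.foldl_cons, pvA_istep]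
    cases h : pred.get? tp.1 with
    | none =>
      rw [ih]; simp [h]
    | some pv =>
      rw [ih]
      simp only [List.filterMap_cons, h, Option.map_some, List.countP_cons, List.length_cons]
      by_cases hm : m.get? pv = some tp.2 <;>
        · simp [hm]
          omega

-- A's outer fold over all rallies, characterised over B's flat pair list.
lemma pvA_outer (m : PySem.Dict Int Int) (gtD predD : PySem.Dict String (PySem.Dict String Int))
    (ct : Int × Int) :
    gtD.items.foldl (pvA_step predD m) ct
      = (ct.1 + ((pvB_pairs gtD predD).countP (fun pg => decide (m.get? pg.1 = some pg.2)) : Int),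
         ct.2 + ((pvB_pairs gtD predD).length : Int)) := by
  show List.foldl _ ct gtD.items = _
  unfold pvB_pairs
  induction gtD.items generalizing ct with
  | nil => simp
  | cons rp rest ih =>
    cases h : predD.get? rp.1 with
    | none => simp only [List.foldl_cons, pvA_step, h]; rw [ih]; simp [h]
    | some pred =>
      simp only [List.foldl_cons, pvA_step, h]
      rw [pvA_inner, ih]
      simp only [List.flatMap_cons, h, List.countP_append, List.length_append, Prod.mk.injEq]
      constructor <;> push_cast <;> ring

-- Summing the 0/1 indicators of equality with x over a Nodup list is the membership indicator.
lemma pvSum_indicator (S : List (Int × Int)) (x : Int × Int) (hS : S.Nodup) :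
    (S.map (fun s => if s = x then (1 : Int) else 0)).sum = if x ∈ S then 1 else 0 := by
  induction S with
  | nil => simp
  | cons s S ih =>
    simp only [List.nodup_cons] at hS
    by_cases hx : s = x
    · subst hx
      simp [hS.1, ih hS.2]
    · simp only [List.map_cons, List.sum_cons, if_neg hx, zero_add, ih hS.2, List.mem_cons]
      have : ¬ x = s := fun h => hx h.symm
      simp [this]

-- countP of membership in a Nodup list equals the summed per-element counts.
lemma pvCountP_eq_sum (S l : List (Int × Int)) (hS : S.Nodup) :
    (l.countP (fun x => decide (x ∈ S)) : Int) = (S.map (fun s => (l.count s : Int))).sum := by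
  induction l with
  | nil => simp
  | cons x l ih =>
    have hsplit : (S.map (fun s => (List.count s (x :: l) : Int))).sum
        = (S.map (fun s => (l.count s : Int))).sum
          + (S.map (fun s => if s = x then (1 : Int) else 0)).sum := by
      rw [← PySem.List.sum_map_add_int]
      congr 1
      apply List.map_congr_left
      intro s _
      rcases eq_or_ne s x with hx | hx
      · subst hx
        simp
      · have hx' : ¬ (x = s) := fun hh => hx hh.symm
        simp [hx, hx']
    rw [hsplit, pvSum_indicator S x hS, List.countP_cons, ← ih]
    by_cases hx : x ∈ S <;> simp [hx]

-- items of a dict built from a list with Nodup keys: the list itself.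
lemma pvItems_ofList (z : List (Int × Int)) (h : (z.map Prod.fst).Nodup) :
    (PySem.Dict.ofList z).items = z := by
  have := PySem.Dict.items_foldl_insert_fresh z Prod.fst Prod.snd PySem.Dict.empty
    (by intro a _; simp) h
  simpa using this

-- The three concrete facts used per permutation, all decidable over the 24-element list.
lemma pvFacts : ∀ p ∈ pvB_perms 4 [1, 2, 3, 4],
    (([1, 2, 3, 4] : List Int).zip p = (List.range 4).map (fun i => (((i : Nat) : Int) + 1, p.getD i 0))) ∧
    ((((([1, 2, 3, 4] : List Int).zip p)).map Prod.fst).Nodup) ∧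
    ((PySem.Dict.ofList (([1, 2, 3, 4] : List Int).zip p)).items
        = (List.range 4).map (fun i => (((i : Nat) : Int) + 1, p.getD i 0))) := by decide

-- A's score of a permutation equals B's four counter lookups.
lemma pvScore (pairs : List (Int × Int)) (p : List Int)
    (hzip : ([1, 2, 3, 4] : List Int).zip p = (List.range 4).map (fun i => (((i : Nat) : Int) + 1, p.getD i 0)))
    (hnd : ((([1, 2, 3, 4] : List Int).zip p).map Prod.fst).Nodup) :
    (pairs.countP (fun pg =>
        decide ((PySem.Dict.ofList (([1, 2, 3, 4] : List Int).zip p)).get? pg.1 = some pg.2)) : Int)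
      = ((List.range 4).map (fun i =>
          (pairs.foldl (fun (d : PySem.Dict (Int × Int) Int) pg => d.modify pg 0 (· + 1))
            PySem.Dict.empty).getD (((i : Nat) : Int) + 1, p.getD i 0) 0)).sum := by
  have hitems := pvItems_ofList _ hnd
  have hkeys : (PySem.Dict.ofList (([1, 2, 3, 4] : List Int).zip p)).keys.Nodup :=
    PySem.Dict.nodup_keys_ofList _
  have hcong : pairs.countP (fun pg =>
      decide ((PySem.Dict.ofList (([1, 2, 3, 4] : List Int).zip p)).get? pg.1 = some pg.2))
      = pairs.countP (fun pg => decide (pg ∈ (([1, 2, 3, 4] : List Int).zip p))) := by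
    apply List.countP_congr
    intro pg _
    have hiff := PySem.Dict.get?_eq_some_iff_mem_items
      (PySem.Dict.ofList (([1, 2, 3, 4] : List Int).zip p)) pg.1 pg.2 hkeys
    rw [hitems] at hiff
    simp [hiff]
  rw [hcong, pvCountP_eq_sum _ _ hnd.of_map, hzip, List.map_map]
  congr 1
  apply List.map_congr_left
  intro i _
  rw [PySem.Dict.getD_foldl_modify_add_one]
  simp

-- Selection over a common permutation list: A's triple-state fold vs B's pair-state fold.
lemma pvSelect_tail (P : List (List Int)) (sA sB : List Int → Int)
    (gA hB : List Int → List (Int × Int)) (T : Int)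
    (hs : ∀ p ∈ P, sA p = sB p) (hg : ∀ p ∈ P, gA p = hB p) :
    ∀ (q : List Int) (c : Int),
    P.foldl (fun best perm => if sA perm > best.2.1 then (gA perm, sA perm, T) else best) (hB q, c, T)
      = (hB (P.foldl (fun b perm => if sB perm > b.2 then (perm, sB perm) else b) (q, c)).1,
         (P.foldl (fun b perm => if sB perm > b.2 then (perm, sB perm) else b) (q, c)).2, T) := by
  induction P with
  | nil => intro q c; simp
  | cons p P ih =>
    intro q c
    have hsp := hs p (by simp)
    have hgp := hg p (by simp)
    have hs' : ∀ x ∈ P, sA x = sB x := fun x hx => hs x (by simp [hx])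
    have hg' : ∀ x ∈ P, gA x = hB x := fun x hx => hg x (by simp [hx])
    simp only [List.foldl_cons]
    by_cases h : sB p > c
    · rw [if_pos (by rw [hsp]; exact h), if_pos h, hsp, hgp]
      exact ih hs' hg' p (sB p)
    · rw [if_neg (by rw [hsp]; exact h), if_neg h]
      exact ih hs' hg' q c

lemma pvSelect (P : List (List Int)) (sA sB : List Int → Int)
    (gA hB : List Int → List (Int × Int)) (T : Int)
    (hs : ∀ p ∈ P, sA p = sB p) (hg : ∀ p ∈ P, gA p = hB p)
    (hnn : ∀ p ∈ P, 0 ≤ sA p) (hne : P ≠ []) :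
    P.foldl (fun best perm => if sA perm > best.2.1 then (gA perm, sA perm, T) else best) ([], -1, 0)
      = (hB (P.foldl (fun b perm => if sB perm > b.2 then (perm, sB perm) else b) ([], -1)).1,
         (P.foldl (fun b perm => if sB perm > b.2 then (perm, sB perm) else b) ([], -1)).2, T) := by
  cases P with
  | nil => exact absurd rfl hne
  | cons p P =>
    have hp : sA p > (-1 : Int) := lt_of_lt_of_le (by norm_num) (hnn p (by simp))
    have hp' : sB p > (-1 : Int) := by rw [← hs p (by simp)]; exact hp
    simp only [List.foldl_cons]
    rw [if_pos (by simpa using hp), if_pos (by simpa using hp'),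
      hs p (by simp), hg p (by simp)]
    exact pvSelect_tail P sA sB gA hB T (fun x hx => hs x (by simp [hx]))
      (fun x hx => hg x (by simp [hx])) p (sB p)

-- A's permutation list is B's.
lemma pvPerms_eq : PySem.List.permutations ([1, 2, 3, 4] : List Int) 4 = pvB_perms 4 [1, 2, 3, 4] := by
  decide

-- Both ports, after their folds have been characterised, produce the same result.
lemma pvMain (gtD predD : PySem.Dict String (PySem.Dict String Int)) :
    ((PySem.List.permutations ([1, 2, 3, 4] : List Int) 4).foldl
      (fun (best : (List (Int × Int)) × Int × Int) perm =>
        let m := PySem.Dict.ofList (([1, 2, 3, 4] : List Int).zip perm)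
        let ct := gtD.items.foldl (pvA_step predD m) ((0 : Int), (0 : Int))
        if ct.1 > best.2.1 then (m.items, ct.1, ct.2) else best)
      ([], -1, 0))
    = (let pairs := pvB_pairs gtD predD
       let cnt := pairs.foldl (fun (d : PySem.Dict (Int × Int) Int) pg => d.modify pg 0 (· + 1))
         PySem.Dict.empty
       let best := (pvB_perms 4 [1, 2, 3, 4]).foldl
         (fun (b : List Int × Int) perm =>
           let score := ((List.range 4).map (fun i => cnt.getD (((i : Nat) : Int) + 1, perm.getD i 0) 0)).sum
           if score > b.2 then (perm, score) else b)
         ([], -1)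
       ((List.range 4).map (fun i => (((i : Nat) : Int) + 1, best.1.getD i 0)), best.2, (pairs.length : Int))) := by
  simp only [pvA_outer, zero_add, pvPerms_eq]
  exact pvSelect (pvB_perms 4 [1, 2, 3, 4])
    (fun perm => ((pvB_pairs gtD predD).countP (fun pg =>
      decide ((PySem.Dict.ofList (([1, 2, 3, 4] : List Int).zip perm)).get? pg.1 = some pg.2)) : Int))
    (fun perm => ((List.range 4).map (fun i =>
      ((pvB_pairs gtD predD).foldl (fun (d : PySem.Dict (Int × Int) Int) pg => d.modify pg 0 (· + 1))
        PySem.Dict.empty).getD (((i : Nat) : Int) + 1, perm.getD i 0) 0)).sum)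
    (fun perm => (PySem.Dict.ofList (([1, 2, 3, 4] : List Int).zip perm)).items)
    (fun q => (List.range 4).map (fun i => (((i : Nat) : Int) + 1, q.getD i 0)))
    ((pvB_pairs gtD predD).length : Int)
    (fun p hp => pvScore (pvB_pairs gtD predD) p (pvFacts p hp).1 (pvFacts p hp).2.1)
    (fun p hp => (pvFacts p hp).2.2)
    (fun p _ => Int.natCast_nonneg _)
    (by decide)

-- ===== VERDICT (by name: the statement is the Claim_ definition above) =====
set_option maxHeartbeats 1000000 in
theorem find_best_permutation_py_spec : Claim_equal_find_best_permutation_py := by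
  intro gt_rallies pred_rallies _
  unfold Spec_find_best_permutation_py
  unfold find_best_permutation_py find_best_permutation_py_alt
  dsimp only
  rw [pvMain]
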